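-- pv_equiv track=rewrite | github.com/berezhko/et2 | src/cabin/checking.py | not_founded_devices
-- ===== SOURCE A (Python) =====
-- def not_founded_devices(a, b):
--     result = {}
--     for name in a:
--         if name not in b:
--             dev = name.split(':')
--             if dev[0] not in result:
--                 result[dev[0]] = []
--             result[dev[0]].append(dev[1])
--     return result
-- ===== SOURCE B (Python) =====
-- def not_founded_devices(a, b):
--     bs = set(b)
--     pairs = [(n.split(':')[0], n.split(':')[1]) for n in a if n not in bs]
--     prefixes = list(dict.fromkeys(q for q, _ in pairs))
--     return {p: [s for q, s in pairs if q == p] for p in prefixes}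
-- ===== Notes on version B (the rewrite author's own statement) =====
-- stated objective: alternative
-- what changed: Replaces the incremental dict-accumulation loop with a three-stage comprehension pipeline: build the (prefix, suffix) pair list once (with b as a set), take the first-occurrence-ordered distinct prefixes via dict.fromkeys, and emit each group by a comprehension filter over the pair list.
import Mathlib
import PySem

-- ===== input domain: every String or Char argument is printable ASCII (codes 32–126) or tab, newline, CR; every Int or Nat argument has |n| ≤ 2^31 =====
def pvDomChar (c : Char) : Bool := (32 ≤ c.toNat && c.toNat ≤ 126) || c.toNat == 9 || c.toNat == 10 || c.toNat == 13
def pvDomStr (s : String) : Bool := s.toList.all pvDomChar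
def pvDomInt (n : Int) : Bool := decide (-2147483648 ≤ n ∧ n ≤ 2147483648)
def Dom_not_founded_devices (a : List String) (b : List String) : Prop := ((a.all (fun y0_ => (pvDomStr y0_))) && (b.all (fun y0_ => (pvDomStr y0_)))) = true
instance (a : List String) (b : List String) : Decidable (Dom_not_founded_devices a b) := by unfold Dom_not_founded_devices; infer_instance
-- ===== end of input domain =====

-- B replaces A's incremental dict-accumulation with a comprehension pipeline: pair list once, ordered distinct prefixes, then per-prefix filters; same return value on Pre_.


-- ===== PORT A =====
-- one loop iteration of A: skip names in b, else split and append dev[1] under key dev[0]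
def notfStep (b : List String) (d : PySem.Dict String (List String)) (name : String) : PySem.Dict String (List String) :=
  if name ∈ b then d
  else
    match PySem.Str.split? name ":" with
    | some (dev0 :: dev1 :: _) =>
        let d' := if d.contains dev0 then d else d.insert dev0 []
        d'.modify dev0 [] (fun l => l ++ [dev1])
    | _ => d   -- Python raises IndexError here (name without ':'); excluded by Pre_

def not_founded_devices (a : List String) (b : List String) : List (String × List String) :=
  (a.foldl (notfStep b) PySem.Dict.empty).items

-- ===== PORT B =====
-- (n.split(':')[0], n.split(':')[1]); none where Python raises IndexError (excluded by Pre_)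
def pvSplit2 (n : String) : Option (String × String) :=
  match PySem.Str.split? n ":" with
  | some (p :: s :: _) => some (p, s)
  | _ => none

def not_founded_devices_alt (a : List String) (b : List String) : List (String × List String) :=
  let pairs := (a.filter (fun n => !decide (n ∈ b))).filterMap pvSplit2
  let prefixes := PySem.List.dedup (pairs.map (fun q => q.1))
  prefixes.map (fun p => (p, (pairs.filter (fun q => q.1 == p)).map (fun q => q.2)))

-- ===== PRECONDITION & SPEC =====
-- Pre_ excludes exactly the inputs where Python A raises IndexError: a name in a, absent from b, with no ':' in it.
def Pre_not_founded_devices (a : List String) (b : List String) : Prop :=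
  ∀ n ∈ a, n ∉ b → 2 ≤ ((PySem.Str.split? n ":").getD []).length
instance (a : List String) (b : List String) : Decidable (Pre_not_founded_devices a b) := by unfold Pre_not_founded_devices; infer_instance
def pvWitness_not_founded_devices : List String × List String := (["x:1", "y:2", "x:3"], ["y:2"])

def Spec_not_founded_devices (a : List String) (b : List String) (out : List (String × List String)) : Prop := out = not_founded_devices_alt a b
instance (a : List String) (b : List String) (out : List (String × List String)) : Decidable (Spec_not_founded_devices a b out) := by unfold Spec_not_founded_devices; infer_instance

-- ===== CLAIM (what is proved, stated in full; the proofs are below) =====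
def Claim_equal_not_founded_devices : Prop := ∀ (a : List String) (b : List String), Dom_not_founded_devices a b → Pre_not_founded_devices a b → Spec_not_founded_devices a b (not_founded_devices a b)

-- ===== LEMMAS AND PROOFS =====

-- "if key missing insert []; then append" is exactly modify with default []
lemma guarded_modify_eq (d : PySem.Dict String (List String)) (p : String) (f : List String → List String) :
    (if d.contains p then d else d.insert p []).modify p [] f = d.modify p [] f := by
  by_cases h : d.contains p = true
  · simp [h]
  · simp only [Bool.not_eq_true] at h
    simp [h, PySem.Dict.modify, PySem.Dict.getD_insert_self,
      PySem.Dict.insert_insert_self, PySem.Dict.getD_of_not_contains d [] h]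

-- A's loop over `a` equals the modify-loop over B's pair list
lemma foldl_notfStep_eq (b : List String) (a : List String) (d : PySem.Dict String (List String)) :
    a.foldl (notfStep b) d
      = ((a.filter (fun n => !decide (n ∈ b))).filterMap pvSplit2).foldl
          (fun d x => d.modify x.1 [] (fun l => l ++ [x.2])) d := by
  induction a generalizing d with
  | nil => rfl
  | cons n rest ih =>
    by_cases hb : n ∈ b
    · simp [notfStep, hb, ih]
    · cases hs : PySem.Str.split? n ":" with
      | none => simp [notfStep, hb, pvSplit2, hs, ih]
      | some l =>
        match l with
        | [] => simp [notfStep, hb, pvSplit2, hs, ih]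
        | [p] => simp [notfStep, hb, pvSplit2, hs, ih]
        | p :: s :: t' =>
          simp [notfStep, hb, pvSplit2, hs, ih, guarded_modify_eq]

-- ===== VERDICT (by name: the statement is the Claim_ definition above) =====
theorem not_founded_devices_spec : Claim_equal_not_founded_devices := by
  intro a b _ _
  unfold Spec_not_founded_devices not_founded_devices not_founded_devices_alt
  rw [foldl_notfStep_eq]
  set pairs := ((a.filter (fun n => !decide (n ∈ b))).filterMap pvSplit2) with hpairs
  have hnd : ((pairs.foldl (fun d x => d.modify x.1 [] (fun l => l ++ [x.2]))
      PySem.Dict.empty)).keys.Nodup := by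
    exact PySem.Dict.nodup_keys_foldl_modify_key pairs (fun x => x.1) []
      (fun _ x => fun l => l ++ [x.2]) PySem.Dict.empty (by simp [PySem.Dict.keys_empty])
  rw [PySem.Dict.items_eq_map_keys _ hnd []]
  rw [PySem.Dict.keys_foldl_modify_key pairs (fun x => x.1) []
      (fun _ x => fun l => l ++ [x.2]) PySem.Dict.empty]
  simp only [PySem.Dict.keys_empty, PySem.Set.update_nil_left,
    PySem.Dict.getD_foldl_modify_append, PySem.Dict.getD_empty, List.nil_append]
  rfl
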